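-- pv_equiv track=rewrite | github.com/ZhiliShen/Programmer-Code-Interview-Guide | 递归和动态规划/机器人达到指定位置方法数/test1.py | ways2
-- ===== SOURCE A (Python) =====
-- def ways2(n: int, m: int, k: int, p: int):
--     if n < 2 or m < 1 or m > n or p < 1 or p > n or k < 1:
--         return 0
--     dp = [[0 for j in range(n + 1)] for i in range(k + 1)]
--     dp[0][p] = 1
--     for i in range(1, k + 1):
--         for j in range(1, n + 1):
--             if j == 1:
--                 dp[i][j] = dp[i - 1][2]
--             elif j == n:
--                 dp[i][j] = dp[i - 1][n - 1]
--             else: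
--                 dp[i][j] = (dp[i - 1][j - 1] + dp[i - 1][j + 1]) % 1000000007
--     return dp[k][m]
-- ===== SOURCE B (Python) =====
-- MOD = 1000000007
--
--
-- def ways2(n, m, k, p):
--     if n < 2 or m < 1 or m > n or p < 1 or p > n or k < 1:
--         return 0
--     lo = max(1, p - k)
--     hi = min(n, p + k)
--     if m < lo or m > hi:
--         return 0
--     w = hi - lo + 1
--
--     def mul(A, B):
--         return [[sum(A[i][t] * B[t][j] for t in range(w)) % MOD
--                  for j in range(w)] for i in range(w)]
--
--     # one-step transition matrix of the +-1 walk on [1, n], restricted to the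
--     # window [p-k, p+k] ∩ [1, n] (positions outside are unreachable in k steps)
--     T = [[1 if abs(i - j) == 1 else 0 for j in range(w)] for i in range(w)]
--     R = [[1 if i == j else 0 for j in range(w)] for i in range(w)]
--     e = k
--     while e:
--         if e & 1:
--             R = mul(R, T)
--         T = mul(T, T)
--         e >>= 1
--     return R[m - lo][p - lo] % MOD
-- ===== Notes on version B (the rewrite author's own statement) =====
-- stated objective: alternative
-- what changed: Replaces A's step-by-step (k+1)x(n+1) DP table by fast exponentiation (repeated squaring) of the one-step tridiagonal transition matrix of the walk, restricted to the reachability window [p-k,p+k] intersected with [1,n]; the answer is one entry of T^k mod 1e9+7, with an immediate 0 when m is outside the window.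
import Mathlib
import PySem

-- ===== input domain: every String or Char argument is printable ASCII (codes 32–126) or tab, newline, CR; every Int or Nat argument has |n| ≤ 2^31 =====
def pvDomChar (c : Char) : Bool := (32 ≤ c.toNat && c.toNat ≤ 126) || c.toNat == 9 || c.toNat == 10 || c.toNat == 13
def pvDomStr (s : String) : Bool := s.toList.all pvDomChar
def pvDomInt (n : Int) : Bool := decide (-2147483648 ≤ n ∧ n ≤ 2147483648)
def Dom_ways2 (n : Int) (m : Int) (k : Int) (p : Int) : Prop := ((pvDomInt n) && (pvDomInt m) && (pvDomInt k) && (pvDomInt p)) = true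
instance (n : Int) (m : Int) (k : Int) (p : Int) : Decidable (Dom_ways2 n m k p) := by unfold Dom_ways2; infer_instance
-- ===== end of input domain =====

-- B replaces A's step-by-step DP table by fast exponentiation (repeated
-- squaring) of the walk's one-step tridiagonal transition matrix, restricted to
-- the reachability window [p-k, p+k] ∩ [1, n]; a different algorithm of
-- comparable cost (cheaper when min(n,k) is small, dearer when both are large).

-- ===== PORT A =====
-- row 0 of dp: all zeros except dp[0][p] = 1
def pvRow0 (n p : Int) : List Int :=
  (List.range (n.toNat + 1)).map (fun (j : Nat) => if (j : Int) = p then (1 : Int) else 0)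

-- the inner 'for j in range(1, n+1)' loop: row i computed from row i-1 (index 0 stays 0)
def pvStepRow (n : Int) (prev : List Int) : List Int :=
  (List.range (n.toNat + 1)).map (fun (j : Nat) =>
    if j = 0 then (0 : Int)
    else if j = 1 then prev.getD 2 0
    else if (j : Int) = n then prev.getD (n.toNat - 1) 0
    else (prev.getD (j - 1) 0 + prev.getD (j + 1) 0) % 1000000007)

def ways2 (n : Int) (m : Int) (k : Int) (p : Int) : Int :=
  if n < 2 ∨ m < 1 ∨ m > n ∨ p < 1 ∨ p > n ∨ k < 1 then 0
  else
    ((((PySem.List.pyRange 1 (k + 1) 1).foldl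
      (fun acc (i : Int) => acc ++ [pvStepRow n (acc.getD (i - 1).toNat [])])
      [pvRow0 n p]).getD k.toNat []).getD m.toNat 0)

-- ===== PORT B =====
-- lo / hi: the reachability window bounds
def pvLo (p k : Int) : Int := max 1 (p - k)
def pvHi (n p k : Int) : Int := min n (p + k)

-- def mul(A, B): [[sum(A[i][t]*B[t][j] for t in range(w)) % MOD for j …] for i …]
def pvMul (w : Nat) (A B : List (List Int)) : List (List Int) :=
  (List.range w).map (fun i => (List.range w).map (fun j =>
    (((List.range w).map (fun t => (A.getD i []).getD t 0 * (B.getD t []).getD j 0)).sum)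
      % 1000000007))

-- T = [[1 if abs(i-j) == 1 else 0 …]]
def pvT0 (w : Nat) : List (List Int) :=
  (List.range w).map (fun (i : Nat) => (List.range w).map (fun (j : Nat) =>
    if |((i : Nat) : Int) - ((j : Nat) : Int)| = 1 then (1 : Int) else 0))

-- R = [[1 if i == j else 0 …]]  (identity)
def pvId (w : Nat) : List (List Int) :=
  (List.range w).map (fun i => (List.range w).map (fun j => if i = j then (1 : Int) else 0))

-- while e: if e & 1: R = mul(R, T); T = mul(T, T); e >>= 1
def pvPowLoop (w : Nat) (e : Nat) (R T : List (List Int)) : List (List Int) :=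
  if h : e = 0 then R
  else pvPowLoop w (e / 2) (if e % 2 = 1 then pvMul w R T else R) (pvMul w T T)
decreasing_by exact Nat.div_lt_self (Nat.pos_of_ne_zero h) one_lt_two

def ways2_alt (n : Int) (m : Int) (k : Int) (p : Int) : Int :=
  if n < 2 ∨ m < 1 ∨ m > n ∨ p < 1 ∨ p > n ∨ k < 1 then 0
  else if m < pvLo p k ∨ m > pvHi n p k then 0
  else
    (((pvPowLoop (pvHi n p k - pvLo p k + 1).toNat k.toNat
          (pvId (pvHi n p k - pvLo p k + 1).toNat)
          (pvT0 (pvHi n p k - pvLo p k + 1).toNat)).getD (m - pvLo p k).toNat []).getD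
        (p - pvLo p k).toNat 0) % 1000000007

-- ===== PRECONDITION & SPEC =====
def Spec_ways2 (n : Int) (m : Int) (k : Int) (p : Int) (out : Int) : Prop := out = ways2_alt n m k p
instance (n : Int) (m : Int) (k : Int) (p : Int) (out : Int) : Decidable (Spec_ways2 n m k p out) := by unfold Spec_ways2; infer_instance

-- ===== CLAIM (what is proved, stated in full; the proofs are below) =====
def Claim_equal_ways2 : Prop := ∀ (n : Int) (m : Int) (k : Int) (p : Int), Dom_ways2 n m k p → Spec_ways2 n m k p (ways2 n m k p)

-- ===== LEMMAS AND PROOFS =====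

-- semantic DP value: gf n p i j = dp[i][j]
def gf (n p : Int) : Nat → Nat → Int
  | 0, j => if (j : Int) = p then 1 else 0
  | i + 1, j =>
    if j = 0 then 0
    else if j = 1 then gf n p i 2
    else if (j : Int) = n then gf n p i (n.toNat - 1)
    else (gf n p i (j - 1) + gf n p i (j + 1)) % 1000000007

theorem gf_bounds (n p : Int) (i j : Nat) : 0 ≤ gf n p i j ∧ gf n p i j < 1000000007 := by
  induction i generalizing j with
  | zero => unfold gf; split <;> omega
  | succ i ih =>
    unfold gf
    split
    · omega
    split
    · exact ih 2
    split
    · exact ih _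
    · constructor
      · exact Int.emod_nonneg _ (by norm_num)
      · exact Int.emod_lt_of_pos _ (by norm_num)

theorem gf_succ (n p : Int) (i j : Nat) :
    gf n p (i + 1) j
      = if j = 0 then 0
        else if j = 1 then gf n p i 2
        else if (j : Int) = n then gf n p i (n.toNat - 1)
        else (gf n p i (j - 1) + gf n p i (j + 1)) % 1000000007 := by
  rw [gf]

-- positions farther than i from p are unreachable after i steps
theorem gf_zero (n p : Int) (i j : Nat) (h : (j : Int) < p - i ∨ p + i < j) : gf n p i j = 0 := by
  induction i generalizing j with
  | zero =>
    rw [gf, if_neg (by omega)]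
  | succ i ih =>
    rw [gf_succ]
    by_cases h0 : j = 0
    · rw [if_pos h0]
    rw [if_neg h0]
    by_cases h1 : j = 1
    · rw [if_pos h1, ih 2 (by omega)]
    rw [if_neg h1]
    by_cases h2 : (j : Int) = n
    · rw [if_pos h2, ih (n.toNat - 1) (by omega)]
    · rw [if_neg h2, ih (j - 1) (by omega), ih (j + 1) (by omega)]
      norm_num

theorem getD_rowL (n p : Int) (i j : Nat) (hj : j < n.toNat + 1) :
    ((List.range (n.toNat + 1)).map (gf n p i)).getD j 0 = gf n p i j := by
  simp [List.getD_eq_getElem?_getD, hj]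

theorem row0_eq (n p : Int) : pvRow0 n p = (List.range (n.toNat + 1)).map (gf n p 0) := by
  unfold pvRow0
  refine List.map_congr_left (fun j _ => ?_)
  rw [gf]

theorem stepRow_eq (n p : Int) (hn : 2 ≤ n) (i : Nat) :
    pvStepRow n ((List.range (n.toNat + 1)).map (gf n p i))
      = (List.range (n.toNat + 1)).map (gf n p (i + 1)) := by
  unfold pvStepRow
  refine List.map_congr_left (fun j hj => ?_)
  rw [List.mem_range] at hj
  rw [gf_succ]
  by_cases h0 : j = 0
  · rw [if_pos h0, if_pos h0]
  rw [if_neg h0, if_neg h0]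
  by_cases h1 : j = 1
  · rw [if_pos h1, if_pos h1, getD_rowL n p i 2 (by omega)]
  rw [if_neg h1, if_neg h1]
  by_cases h2 : (j : Int) = n
  · rw [if_pos h2, if_pos h2, getD_rowL n p i (n.toNat - 1) (by omega)]
  · rw [if_neg h2, if_neg h2, getD_rowL n p i (j - 1) (by omega),
      getD_rowL n p i (j + 1) (by omega)]

theorem dp_foldl (n p : Int) (hn : 2 ≤ n) (j : Nat) :
    (PySem.List.pyRange 1 ((j : Int) + 1) 1).foldl
      (fun acc (i : Int) => acc ++ [pvStepRow n (acc.getD (i - 1).toNat [])]) [pvRow0 n p]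
      = (List.range (j + 1)).map (fun i => (List.range (n.toNat + 1)).map (gf n p i)) := by
  induction j with
  | zero =>
    rw [show ((0 : Nat) : Int) + 1 = 1 by norm_num,
      PySem.List.pyRange_one_eq_nil (by norm_num), List.foldl_nil, row0_eq]
    rfl
  | succ j ih =>
    have hsplit : PySem.List.pyRange 1 (((j + 1 : Nat) : Int) + 1) 1
        = PySem.List.pyRange 1 ((j : Int) + 1) 1 ++ [(j : Int) + 1] := by
      rw [show (((j + 1 : Nat) : Int) + 1) = ((j : Int) + 1) + 1 by push_cast; ring]
      rw [PySem.List.pyRange_one_succ_right (by omega)]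
    rw [hsplit, List.foldl_append, ih]
    have hidx : ((j : Int) + 1 - 1).toNat = j := by omega
    simp only [List.foldl_cons, List.foldl_nil, hidx]
    have hget : ((List.range (j + 1)).map
          (fun i => (List.range (n.toNat + 1)).map (gf n p i))).getD j []
        = (List.range (n.toNat + 1)).map (gf n p j) := by
      simp [List.getD_eq_getElem?_getD]
    have hr : List.range (j + 1 + 1) = List.range (j + 1) ++ [j + 1] := List.range_succ
    rw [hget, stepRow_eq n p hn j, hr, List.map_append]
    rfl

theorem ways2_eq_gf (n m k p : Int)
    (hg : ¬(n < 2 ∨ m < 1 ∨ m > n ∨ p < 1 ∨ p > n ∨ k < 1)) :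
    ways2 n m k p = gf n p k.toNat m.toNat := by
  have hG := hg
  push Not at hG
  obtain ⟨hn2, hm1, hmn, hp1, hpn, hk1⟩ := hG
  unfold ways2
  rw [if_neg hg]
  rw [show k + 1 = ((k.toNat : Int) + 1) by omega]
  rw [dp_foldl n p hn2 k.toNat]
  have hget : ((List.range (k.toNat + 1)).map
        (fun i => (List.range (n.toNat + 1)).map (gf n p i))).getD k.toNat []
      = (List.range (n.toNat + 1)).map (gf n p k.toNat) := by
    simp [List.getD_eq_getElem?_getD]
  rw [hget, getD_rowL n p k.toNat m.toNat (by omega)]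

-- ===== B-side lemmas: the list matrices mirror ZMod 1000000007 matrices =====

def pvToM (w : Nat) (A : List (List Int)) : Matrix (Fin w) (Fin w) (ZMod 1000000007) :=
  Matrix.of fun i j => (((A.getD i []).getD j 0 : Int) : ZMod 1000000007)

def pvAdj (w : Nat) : Matrix (Fin w) (Fin w) (ZMod 1000000007) :=
  Matrix.of fun i j => if |((i : Nat) : Int) - ((j : Nat) : Int)| = 1 then 1 else 0

theorem getD_range_map {α : Type} (w : Nat) (f : Nat → α) (d : α) (i : Nat) (h : i < w) :
    ((List.range w).map f).getD i d = f i := by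
  simp [List.getD_eq_getElem?_getD, h]

theorem cast_emod (x : Int) :
    ((x % 1000000007 : Int) : ZMod 1000000007) = (x : ZMod 1000000007) := by
  have h : ((1000000007 : Int) : ZMod 1000000007) = 0 := by
    rw [ZMod.intCast_zmod_eq_zero_iff_dvd]; norm_num
  calc ((x % 1000000007 : Int) : ZMod 1000000007)
      = ((x - 1000000007 * (x / 1000000007) : Int) : ZMod 1000000007) := by
        rw [Int.emod_def]
    _ = (x : ZMod 1000000007) := by
        rw [Int.cast_sub, Int.cast_mul, h, zero_mul, sub_zero]

theorem cast_sum_range (w : Nat) (g : Nat → Int) :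
    ((((List.range w).map g).sum : Int) : ZMod 1000000007)
      = ∑ t ∈ Finset.range w, ((g t : Int) : ZMod 1000000007) := by
  induction w with
  | zero => simp
  | succ w ih =>
    rw [List.range_succ, List.map_append, List.sum_append, Finset.sum_range_succ, ← ih]
    push_cast
    simp

theorem toM_mul (w : Nat) (A B : List (List Int)) :
    pvToM w (pvMul w A B) = pvToM w A * pvToM w B := by
  ext i j
  show (((pvMul w A B).getD i []).getD j 0 : ZMod 1000000007) = _
  unfold pvMul
  rw [getD_range_map w _ [] i i.isLt, getD_range_map w _ 0 j j.isLt, cast_emod, cast_sum_range,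
    Matrix.mul_apply, Finset.sum_range]
  exact Finset.sum_congr rfl (fun t _ => by push_cast; rfl)

theorem toM_id (w : Nat) : pvToM w (pvId w) = 1 := by
  ext i j
  show (((pvId w).getD i []).getD j 0 : ZMod 1000000007) = _
  unfold pvId
  rw [getD_range_map w _ [] i i.isLt, getD_range_map w _ 0 j j.isLt, Matrix.one_apply]
  by_cases h : (i : Nat) = (j : Nat)
  · rw [if_pos h, if_pos (Fin.ext h)]; norm_num
  · rw [if_neg h, if_neg (fun hc => h (congrArg Fin.val hc))]; norm_num

theorem toM_T0 (w : Nat) : pvToM w (pvT0 w) = pvAdj w := by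
  ext i j
  show (((pvT0 w).getD i []).getD j 0 : ZMod 1000000007) = _
  unfold pvT0 pvAdj
  rw [getD_range_map w _ [] i i.isLt, getD_range_map w _ 0 j j.isLt]
  by_cases h : |((i : Nat) : Int) - ((j : Nat) : Int)| = 1
  · rw [if_pos h]; simp [Matrix.of_apply, h]
  · rw [if_neg h]; simp [Matrix.of_apply, h]

theorem toM_powLoop (w : Nat) (e : Nat) (R T : List (List Int)) :
    pvToM w (pvPowLoop w e R T) = pvToM w R * (pvToM w T) ^ e := by
  induction e using Nat.strong_induction_on generalizing R T with
  | _ e ih =>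
    rw [pvPowLoop]
    by_cases h : e = 0
    · rw [dif_pos h, h, pow_zero, mul_one]
    · rw [dif_neg h, ih (e / 2) (Nat.div_lt_self (Nat.pos_of_ne_zero h) one_lt_two), toM_mul]
      have hsq : pvToM w T * pvToM w T = pvToM w T ^ 2 := (sq (pvToM w T)).symm
      have hkey : ∀ (X : Matrix (Fin w) (Fin w) (ZMod 1000000007)),
          (X * pvToM w T ^ (e % 2)) * (pvToM w T ^ 2) ^ (e / 2) = X * pvToM w T ^ e := by
        intro X
        rw [← pow_mul, mul_assoc, ← pow_add]
        congr 2
        omega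
      by_cases hb : e % 2 = 1
      · rw [if_pos hb, toM_mul, hsq]
        have h1 := hkey (pvToM w R)
        rw [hb, pow_one] at h1
        rw [h1]
      · rw [if_neg hb, hsq]
        have h0 : e % 2 = 0 := by omega
        have := hkey (pvToM w R)
        rw [h0, pow_zero, mul_one] at this
        rw [this]

-- sum over a row of the adjacency matrix picks out the two neighbours
theorem adj_mulVec (w : Nat) (v : Fin w → ZMod 1000000007) (a : Fin w) :
    (pvAdj w).mulVec v a
      = (if h : 0 < (a : Nat) then v ⟨(a : Nat) - 1, by omega⟩ else 0)
        + (if h : (a : Nat) + 1 < w then v ⟨(a : Nat) + 1, h⟩ else 0) := by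
  have hsum : (pvAdj w).mulVec v a
      = ∑ b : Fin w, (if |((a : Nat) : Int) - ((b : Nat) : Int)| = 1 then (1 : ZMod 1000000007) else 0) * v b := by
    rfl
  rw [hsum]
  have hsplit : ∀ b : Fin w,
      (if |((a : Nat) : Int) - ((b : Nat) : Int)| = 1 then (1 : ZMod 1000000007) else 0) * v b
        = (if (b : Nat) + 1 = (a : Nat) then v b else 0) + (if (b : Nat) = (a : Nat) + 1 then v b else 0) := by
    intro b
    by_cases h1 : (b : Nat) + 1 = (a : Nat)
    · rw [if_pos (by rw [abs_eq (by norm_num : (0:Int) ≤ 1)]; omega :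
          |((a : Nat) : Int) - ((b : Nat) : Int)| = 1), if_pos h1,
        if_neg (by omega), one_mul, add_zero]
    · by_cases h2 : (b : Nat) = (a : Nat) + 1
      · rw [if_pos (by rw [abs_eq (by norm_num : (0:Int) ≤ 1)]; omega :
            |((a : Nat) : Int) - ((b : Nat) : Int)| = 1), if_neg h1,
          if_pos h2, one_mul, zero_add]
      · rw [if_neg (by rw [abs_eq (by norm_num : (0:Int) ≤ 1)]; omega :
            ¬ |((a : Nat) : Int) - ((b : Nat) : Int)| = 1), if_neg h1, if_neg h2, zero_mul, add_zero]
  rw [Finset.sum_congr rfl (fun b _ => hsplit b), Finset.sum_add_distrib]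
  congr 1
  · by_cases h : 0 < (a : Nat)
    · rw [dif_pos h]
      have hc : ∀ b : Fin w, ((b : Nat) + 1 = (a : Nat)) ↔ b = (⟨(a : Nat) - 1, by omega⟩ : Fin w) := by
        intro b
        rw [Fin.ext_iff]
        show (b : Nat) + 1 = (a : Nat) ↔ (b : Nat) = (a : Nat) - 1
        omega
      rw [Finset.sum_congr rfl (fun b _ => if_congr (hc b) rfl rfl),
        Finset.sum_ite_eq' Finset.univ _ v, if_pos (Finset.mem_univ _)]
    · rw [dif_neg h, Finset.sum_eq_zero]
      intro b _
      rw [if_neg (by omega)]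
  · by_cases h : (a : Nat) + 1 < w
    · rw [dif_pos h]
      have hc : ∀ b : Fin w, ((b : Nat) = (a : Nat) + 1) ↔ b = (⟨(a : Nat) + 1, h⟩ : Fin w) := by
        intro b
        rw [Fin.ext_iff]
      rw [Finset.sum_congr rfl (fun b _ => if_congr (hc b) rfl rfl),
        Finset.sum_ite_eq' Finset.univ _ v, if_pos (Finset.mem_univ _)]
    · rw [dif_neg h, Finset.sum_eq_zero]
      intro b _
      have hb := b.isLt
      rw [if_neg (by omega)]

-- the vector of dp-values over the window, as ZMod elements
def vcast (n p k : Int) (i : Nat) : Fin (pvHi n p k - pvLo p k + 1).toNat → ZMod 1000000007 :=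
  fun t => ((gf n p i ((t : Nat) + (pvLo p k).toNat) : Int) : ZMod 1000000007)

-- one Int-level DP step expressed inside the window (boundary-correct)
theorem gf_window_step (n p k : Int) (hn : 2 ≤ n) (hp1 : 1 ≤ p) (hpn : p ≤ n) (hk : 1 ≤ k)
    (i : Nat) (hik : i < k.toNat) (t : Nat) (ht : t < (pvHi n p k - pvLo p k + 1).toNat) :
    ((if t = 0 then (0 : Int) else gf n p i (t - 1 + (pvLo p k).toNat))
        + (if t + 1 < (pvHi n p k - pvLo p k + 1).toNat
            then gf n p i (t + 1 + (pvLo p k).toNat) else 0)) % 1000000007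
      = gf n p (i + 1) (t + (pvLo p k).toNat) := by
  have hA : pvLo p k = 1 ∨ pvLo p k = p - k := by unfold pvLo; omega
  have hC : pvHi n p k = n ∨ pvHi n p k = p + k := by unfold pvHi; omega
  have hB : 1 ≤ pvLo p k ∧ pvLo p k ≤ p ∧ p - k ≤ pvLo p k := by unfold pvLo; omega
  have hD : pvHi n p k ≤ n ∧ pvHi n p k ≤ p + k ∧ p ≤ pvHi n p k := by unfold pvHi; omega
  have hW2 : 2 ≤ (pvHi n p k - pvLo p k + 1).toNat := by unfold pvLo pvHi; omega
  have hgb := fun j => gf_bounds n p i j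
  by_cases ht0 : t = 0
  · subst ht0
    rw [if_pos rfl, if_pos (by omega), zero_add]
    by_cases hL1 : (pvLo p k).toNat = 1
    · rw [gf_succ, if_neg (by omega), if_pos (by omega)]
      rw [show 0 + 1 + (pvLo p k).toNat = 2 by omega]
      exact Int.emod_eq_of_lt (hgb 2).1 (hgb 2).2
    · rw [gf_succ, if_neg (by omega), if_neg (by omega), if_neg (by omega)]
      rw [gf_zero n p i ((0 + (pvLo p k).toNat) - 1) (by omega), zero_add]
      rw [show 0 + 1 + (pvLo p k).toNat = 0 + (pvLo p k).toNat + 1 by omega]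
      norm_num
  · rw [if_neg ht0]
    by_cases htW : t + 1 < (pvHi n p k - pvLo p k + 1).toNat
    · rw [if_pos htW]
      rw [gf_succ, if_neg (by omega), if_neg (by omega), if_neg (by omega)]
      rw [show t - 1 + (pvLo p k).toNat = t + (pvLo p k).toNat - 1 by omega,
        show t + 1 + (pvLo p k).toNat = t + (pvLo p k).toNat + 1 by omega]
    · rw [if_neg htW, add_zero]
      by_cases hn' : ((t + (pvLo p k).toNat : Nat) : Int) = n
      · rw [gf_succ, if_neg (by omega), if_neg (by omega), if_pos hn']
        rw [show t - 1 + (pvLo p k).toNat = n.toNat - 1 by omega]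
        exact Int.emod_eq_of_lt (hgb _).1 (hgb _).2
      · rw [gf_succ, if_neg (by omega), if_neg (by omega), if_neg hn']
        rw [gf_zero n p i ((t + (pvLo p k).toNat) + 1) (by omega), add_zero]
        rw [show t - 1 + (pvLo p k).toNat = t + (pvLo p k).toNat - 1 by omega]

theorem vcast_step (n p k : Int) (hn : 2 ≤ n) (hp1 : 1 ≤ p) (hpn : p ≤ n) (hk : 1 ≤ k)
    (i : Nat) (hik : i < k.toNat) :
    (pvAdj (pvHi n p k - pvLo p k + 1).toNat).mulVec (vcast n p k i) = vcast n p k (i + 1) := by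
  funext a
  rw [adj_mulVec]
  show _ = ((gf n p (i + 1) ((a : Nat) + (pvLo p k).toNat) : Int) : ZMod 1000000007)
  rw [← gf_window_step n p k hn hp1 hpn hk i hik (a : Nat) a.isLt, cast_emod, Int.cast_add]
  congr 1
  · by_cases h0 : 0 < (a : Nat)
    · rw [dif_pos h0, if_neg (by omega)]
      rfl
    · rw [dif_neg h0, if_pos (by omega)]
      norm_num
  · by_cases h1 : (a : Nat) + 1 < (pvHi n p k - pvLo p k + 1).toNat
    · rw [dif_pos h1, if_pos h1]
      rfl
    · rw [dif_neg h1, if_neg h1]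
      norm_num

theorem vcast_zero (n p k : Int) (hp1 : 1 ≤ p) (hpn : p ≤ n) (hk : 1 ≤ k) :
    vcast n p k 0
      = Pi.single (⟨(p - pvLo p k).toNat, by unfold pvHi pvLo; omega⟩ :
          Fin (pvHi n p k - pvLo p k + 1).toNat) 1 := by
  have hB : 1 ≤ pvLo p k ∧ pvLo p k ≤ p := by unfold pvLo; omega
  funext t
  show ((gf n p 0 ((t : Nat) + (pvLo p k).toNat) : Int) : ZMod 1000000007) = _
  rw [gf, Pi.single_apply]
  by_cases h : (((t : Nat) + (pvLo p k).toNat : Nat) : Int) = p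
  · rw [if_pos h, if_pos (by rw [Fin.ext_iff]; show (t : Nat) = (p - pvLo p k).toNat; omega)]
    norm_num
  · rw [if_neg h, if_neg (by rw [Fin.ext_iff]; show ¬ (t : Nat) = (p - pvLo p k).toNat; omega)]
    norm_num

theorem vcast_pow (n p k : Int) (hn : 2 ≤ n) (hp1 : 1 ≤ p) (hpn : p ≤ n) (hk : 1 ≤ k)
    (i : Nat) (hik : i ≤ k.toNat) :
    ((pvAdj (pvHi n p k - pvLo p k + 1).toNat) ^ i).mulVec (vcast n p k 0) = vcast n p k i := by
  induction i with
  | zero => rw [pow_zero, Matrix.one_mulVec]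
  | succ i ih =>
    rw [pow_succ', ← Matrix.mulVec_mulVec, ih (by omega), vcast_step n p k hn hp1 hpn hk i (by omega)]

theorem ways2_alt_eq_gf (n m k p : Int)
    (hg : ¬(n < 2 ∨ m < 1 ∨ m > n ∨ p < 1 ∨ p > n ∨ k < 1)) :
    ways2_alt n m k p = gf n p k.toNat m.toNat := by
  have hG := hg
  push Not at hG
  obtain ⟨hn2, hm1, hmn, hp1, hpn, hk1⟩ := hG
  unfold ways2_alt
  rw [if_neg hg]
  have hA : pvLo p k = 1 ∨ pvLo p k = p - k := by unfold pvLo; omega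
  have hC : pvHi n p k = n ∨ pvHi n p k = p + k := by unfold pvHi; omega
  have hB : 1 ≤ pvLo p k ∧ pvLo p k ≤ p ∧ p - k ≤ pvLo p k := by unfold pvLo; omega
  have hD : pvHi n p k ≤ n ∧ pvHi n p k ≤ p + k ∧ p ≤ pvHi n p k := by unfold pvHi; omega
  by_cases hm : m < pvLo p k ∨ m > pvHi n p k
  · rw [if_pos hm, gf_zero n p k.toNat m.toNat (by omega)]
  · rw [if_neg hm]
    push Not at hm
    have hm' : (m - pvLo p k).toNat < (pvHi n p k - pvLo p k + 1).toNat := by omega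
    have hp' : (p - pvLo p k).toNat < (pvHi n p k - pvLo p k + 1).toNat := by omega
    set W := (pvHi n p k - pvLo p k + 1).toNat with hW
    set E : Int := ((pvPowLoop W k.toNat (pvId W) (pvT0 W)).getD (m - pvLo p k).toNat []).getD
      (p - pvLo p k).toNat 0 with hE
    have hz : ((E % 1000000007 : Int) : ZMod 1000000007)
        = ((gf n p k.toNat m.toNat : Int) : ZMod 1000000007) := by
      rw [cast_emod]
      have h1 : ((E : Int) : ZMod 1000000007)
          = pvToM W (pvPowLoop W k.toNat (pvId W) (pvT0 W))
              ⟨(m - pvLo p k).toNat, hm'⟩ ⟨(p - pvLo p k).toNat, hp'⟩ := by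
        rw [hE]
        rfl
      rw [h1, toM_powLoop, toM_id, toM_T0, one_mul]
      have hvp := vcast_pow n p k hn2 hp1 hpn hk1 k.toNat le_rfl
      rw [vcast_zero n p k hp1 hpn hk1, Matrix.mulVec_single, MulOpposite.op_one,
        one_smul] at hvp
      have h2 := congrFun hvp ⟨(m - pvLo p k).toNat, hm'⟩
      have h3 : vcast n p k k.toNat ⟨(m - pvLo p k).toNat, hm'⟩
          = ((gf n p k.toNat ((m - pvLo p k).toNat + (pvLo p k).toNat) : Int) : ZMod 1000000007) :=
        rfl
      rw [show (m - pvLo p k).toNat + (pvLo p k).toNat = m.toNat by omega] at h3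
      exact h2.trans h3
    have hb := gf_bounds n p k.toNat m.toNat
    have hr1 : 0 ≤ E % 1000000007 := Int.emod_nonneg _ (by norm_num)
    have hr2 : E % 1000000007 < 1000000007 := Int.emod_lt_of_pos _ (by norm_num)
    have heq : (E % 1000000007) % 1000000007 = gf n p k.toNat m.toNat % 1000000007 :=
      (ZMod.intCast_eq_intCast_iff _ _ _).mp hz
    omega

-- ===== VERDICT (by name: the statement is the Claim_ definition above) =====
theorem ways2_spec : Claim_equal_ways2 := by
  intro n m k p _
  unfold Spec_ways2
  by_cases hg : n < 2 ∨ m < 1 ∨ m > n ∨ p < 1 ∨ p > n ∨ k < 1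
  · simp only [ways2, ways2_alt, if_pos hg]
  · rw [ways2_eq_gf n m k p hg, ways2_alt_eq_gf n m k p hg]
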